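-- pv_equiv track=rewrite | github.com/Frostwoods/HLCL | test/testExtractSkeleton.py | hasCrossBetweenPaths
-- ===== SOURCE A (Python) =====
-- def hasCrossBetweenPaths(currentPath,pathList):
--     if pathList==[]:
--         return False
--     for path in pathList:
--         crossList=[node for node in currentPath[1:-2] if node in path[1:-2]] #remove head and tail
--         if len(crossList)>0:
--             return True
--     return False
-- ===== SOURCE B (Python) =====
-- def hasCrossBetweenPaths(currentPath, pathList):
--     allInterior = set()
--     for path in pathList:
--         allInterior.update(path[1:-2])
--     return any(node in allInterior for node in currentPath[1:-2])
-- ===== Notes on version B (the rewrite author's own statement) =====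
-- stated objective: faster
-- what changed: A scans every path with a per-path quadratic list-membership intersection and early-returns; B aggregates all interior nodes into one hash set first, then makes a single membership pass over currentPath[1:-2].
import Mathlib
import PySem

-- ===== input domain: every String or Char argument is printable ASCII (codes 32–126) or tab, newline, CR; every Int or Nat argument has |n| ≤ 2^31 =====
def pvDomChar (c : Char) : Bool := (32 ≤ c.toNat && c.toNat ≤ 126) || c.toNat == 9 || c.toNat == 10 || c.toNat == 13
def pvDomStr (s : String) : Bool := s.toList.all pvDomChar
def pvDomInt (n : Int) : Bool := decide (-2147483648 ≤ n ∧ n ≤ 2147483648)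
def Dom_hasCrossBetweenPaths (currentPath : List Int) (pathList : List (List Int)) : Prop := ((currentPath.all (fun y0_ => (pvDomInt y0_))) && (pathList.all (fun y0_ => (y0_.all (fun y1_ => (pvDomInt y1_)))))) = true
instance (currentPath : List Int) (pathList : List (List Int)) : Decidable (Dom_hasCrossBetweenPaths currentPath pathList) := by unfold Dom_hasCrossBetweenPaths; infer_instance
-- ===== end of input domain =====

-- B replaces A's per-path intersection scan by one aggregated interior-node set
-- followed by a single membership pass over currentPath[1:-2] (objective: faster — set index replaces nested membership scans).

-- ===== PORT A =====
-- Python A: early-return loop over pathList; per path build crossList by list-membership filter.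
def hasCrossBetweenPaths (currentPath : List Int) (pathList : List (List Int)) : Bool :=
  match pathList with
  | [] => false
  | path :: rest =>
      let crossList := (PySem.List.slice currentPath (some 1) (some (-2))).filter
        (fun node => decide (node ∈ PySem.List.slice path (some 1) (some (-2))))
      if crossList.length > 0 then true
      else hasCrossBetweenPaths currentPath rest

-- ===== PORT B =====
-- B: accumulate one set of all interior nodes, then a single any-pass.
def hasCrossBetweenPaths_alt (currentPath : List Int) (pathList : List (List Int)) : Bool :=
  let allInterior : PySem.Set Int :=
    pathList.foldl (fun s path => PySem.Set.update s (PySem.List.slice path (some 1) (some (-2)))) PySem.Set.empty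
  (PySem.List.slice currentPath (some 1) (some (-2))).any
    (fun node => PySem.Set.contains allInterior node)

-- ===== PRECONDITION & SPEC =====
def Spec_hasCrossBetweenPaths (currentPath : List Int) (pathList : List (List Int)) (out : Bool) : Prop := out = hasCrossBetweenPaths_alt currentPath pathList
instance (currentPath : List Int) (pathList : List (List Int)) (out : Bool) : Decidable (Spec_hasCrossBetweenPaths currentPath pathList out) := by unfold Spec_hasCrossBetweenPaths; infer_instance

-- ===== CLAIM (what is proved, stated in full; the proofs are below) =====
def Claim_equal_hasCrossBetweenPaths : Prop := ∀ (currentPath : List Int) (pathList : List (List Int)), Dom_hasCrossBetweenPaths currentPath pathList → Spec_hasCrossBetweenPaths currentPath pathList (hasCrossBetweenPaths currentPath pathList)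

-- ===== LEMMAS AND PROOFS =====

-- A returns true iff some path's interior meets currentPath's interior.
theorem hasCross_A_char (c : List Int) (ps : List (List Int)) :
    hasCrossBetweenPaths c ps =
      ps.any (fun path => (PySem.List.slice c (some 1) (some (-2))).any
        (fun node => decide (node ∈ PySem.List.slice path (some 1) (some (-2))))) := by
  induction ps with
  | nil => rfl
  | cons p rest ih =>
      simp only [hasCrossBetweenPaths, List.any_cons, ih]
      by_cases h : ((PySem.List.slice c (some 1) (some (-2))).filter
          (fun node => decide (node ∈ PySem.List.slice p (some 1) (some (-2))))).length > 0
      · simp only [h, if_true]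
        obtain ⟨x, hx⟩ := List.exists_mem_of_length_pos h
        rw [List.mem_filter] at hx
        have : (PySem.List.slice c (some 1) (some (-2))).any
            (fun node => decide (node ∈ PySem.List.slice p (some 1) (some (-2)))) = true :=
          List.any_eq_true.mpr ⟨x, hx.1, hx.2⟩
        simp [this]
      · simp only [h, if_false]
        have : (PySem.List.slice c (some 1) (some (-2))).any
            (fun node => decide (node ∈ PySem.List.slice p (some 1) (some (-2)))) = false := by
          rw [List.any_eq_false]
          intro x hx hmem
          exact h (List.length_pos_iff.mpr (List.ne_nil_of_mem (List.mem_filter.mpr ⟨hx, hmem⟩)))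
        simp [this]

-- membership in the accumulated interior set
theorem mem_foldl_update (ps : List (List Int)) (s : PySem.Set Int) (x : Int) :
    (x ∈ ps.foldl (fun s path => PySem.Set.update s (PySem.List.slice path (some 1) (some (-2)))) s) ↔
      x ∈ s ∨ ∃ p ∈ ps, x ∈ PySem.List.slice p (some 1) (some (-2)) := by
  induction ps generalizing s with
  | nil => simp
  | cons p rest ih =>
      simp only [List.foldl_cons, ih, PySem.Set.mem_update, List.mem_cons]
      constructor
      · rintro ((h | h) | ⟨q, hq, hx⟩)
        · exact Or.inl h
        · exact Or.inr ⟨p, Or.inl rfl, h⟩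
        · exact Or.inr ⟨q, Or.inr hq, hx⟩
      · rintro (h | ⟨q, (rfl | hq), hx⟩)
        · exact Or.inl (Or.inl h)
        · exact Or.inl (Or.inr hx)
        · exact Or.inr ⟨q, hq, hx⟩

-- ===== VERDICT (by name: the statement is the Claim_ definition above) =====
theorem hasCrossBetweenPaths_spec : Claim_equal_hasCrossBetweenPaths := by
  intro c ps _
  unfold Spec_hasCrossBetweenPaths hasCrossBetweenPaths_alt
  rw [hasCross_A_char, ← Bool.coe_iff_coe]
  simp only [List.any_eq_true, PySem.Set.contains_iff, mem_foldl_update, decide_eq_true_eq,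
    PySem.Set.empty, List.not_mem_nil, false_or]
  constructor
  · rintro ⟨p, hp, x, hx, hm⟩; exact ⟨x, hx, p, hp, hm⟩
  · rintro ⟨x, hx, p, hp, hm⟩; exact ⟨p, hp, x, hx, hm⟩
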